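-- pv_equiv track=rewrite | github.com/InKyuHwang001/Algorithm | 프로그래머스/Python/lev3/1week/최고의집합.py | solution
-- ===== SOURCE A (Python) =====
-- def solution(n, s):
--     if n > s :
--         return [-1]
--
--     ans = []
--
--     part = int(s//n)
--
--     for _ in range(n):
--         ans.append(part)
--     elses = s%n
--
--     for i in range(elses):
--         ans[i] += 1
--     ans.sort()
--
--     return ans
-- ===== SOURCE B (Python) =====
-- def solution(n, s):
--     if n > s:
--         return [-1]
--     ans = []
--     rem = s
--     for k in range(n, 0, -1):
--         v = rem // k
--         ans.append(v)
--         rem -= v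
--     return ans
-- ===== Notes on version B (the rewrite author's own statement) =====
-- stated objective: alternative
-- what changed: Replaces A's fill-then-increment-prefix-then-sort (two staged loops plus a sort over a mutable list) by a single descending greedy pass: for k = n down to 1 append rem//k and subtract it from the running remainder, which emits the ascending result directly.
import Mathlib
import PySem

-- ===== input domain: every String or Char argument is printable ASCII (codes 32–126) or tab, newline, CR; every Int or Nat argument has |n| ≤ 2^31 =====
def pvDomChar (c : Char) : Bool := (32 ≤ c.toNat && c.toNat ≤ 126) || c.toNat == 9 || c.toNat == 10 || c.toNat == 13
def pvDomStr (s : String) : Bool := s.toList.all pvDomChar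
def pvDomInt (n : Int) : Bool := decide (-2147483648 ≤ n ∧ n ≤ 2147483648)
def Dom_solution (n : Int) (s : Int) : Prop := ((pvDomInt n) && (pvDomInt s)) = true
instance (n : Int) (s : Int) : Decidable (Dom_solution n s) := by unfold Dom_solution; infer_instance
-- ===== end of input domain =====

-- B replaces A's fill loop, prefix-increment loop and final sort by one descending greedy
-- pass (for k = n..1 emit rem//k and subtract it), which is already ascending (objective:
-- alternative, same O(n) work without the sort).

-- ===== PORT A =====
-- 'ans[i] += 1' is ported as List.modify; in every execution A reaches the index is in
-- range (0 ≤ i < s%n ≤ len(ans)), where List.modify is exactly Python's item assignment.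
def solution (n : Int) (s : Int) : List Int :=
  if n > s then [-1]
  else
    let part := PySem.Int.floordiv s n          -- int(s//n); int() of an int is the identity
    let ans := (PySem.List.pyRange 0 n).foldl (fun acc _ => acc ++ [part]) []
    let elses := PySem.Int.mod s n
    let ans2 := (PySem.List.pyRange 0 elses).foldl (fun acc i => acc.modify i.toNat (· + 1)) ans
    PySem.List.sorted ans2 (fun x => x)

-- ===== PORT B =====
def solution_alt (n : Int) (s : Int) : List Int :=
  if n > s then [-1]
  else
    ((PySem.List.pyRange n 0 (-1)).foldl
      (fun (st : List Int × Int) k =>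
        let v := PySem.Int.floordiv st.2 k
        (st.1 ++ [v], st.2 - v)) ([], s)).1

-- ===== PRECONDITION & SPEC =====
-- Pre_ excludes exactly the inputs where A raises ZeroDivisionError: n = 0 with 0 ≤ s
-- (for n = 0, s < 0 the guard n > s returns [-1] before the division).
def Pre_solution (n : Int) (s : Int) : Prop := ¬ (n = 0 ∧ 0 ≤ s)
instance (n : Int) (s : Int) : Decidable (Pre_solution n s) := by unfold Pre_solution; infer_instance
def pvWitness_solution : Int × Int := (2, 9)
def Spec_solution (n : Int) (s : Int) (out : List Int) : Prop := out = solution_alt n s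
instance (n : Int) (s : Int) (out : List Int) : Decidable (Spec_solution n s out) := by unfold Spec_solution; infer_instance

-- ===== CLAIM (what is proved, stated in full; the proofs are below) =====
def Claim_equal_solution : Prop := ∀ (n : Int) (s : Int), Dom_solution n s → Pre_solution n s → Spec_solution n s (solution n s)

-- ===== LEMMAS AND PROOFS =====

-- proof-side recursion computing B's loop body (used only below the claim block)
def pvG : List Int → Int → List Int
  | [], _ => []
  | k :: ks, rem =>
      let v := PySem.Int.floordiv rem k
      v :: pvG ks (rem - v)

theorem pv_foldl_eq_G (l : List Int) (ans : List Int) (rem : Int) :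
    ((l.foldl (fun (st : List Int × Int) k =>
        let v := PySem.Int.floordiv st.2 k
        (st.1 ++ [v], st.2 - v)) (ans, rem)).1) = ans ++ pvG l rem := by
  induction l generalizing ans rem with
  | nil => simp [pvG]
  | cons k ks ih => simp [pvG, ih]

theorem pv_floordiv_block (b q r : Int) (h0 : 0 ≤ r) (h1 : r < b) :
    PySem.Int.floordiv (b * q + r) b = q := by
  have hb : 0 < b := by omega
  rw [PySem.Int.floordiv_eq_iff_of_pos hb]
  constructor <;> nlinarith

-- B's greedy loop on m+1 slots and sum (m+1)*q + r yields the ascending closed form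
theorem pv_G_closed (m : Nat) : ∀ (q r : Int), 0 ≤ r → r ≤ (m : Int) →
    pvG (PySem.List.pyRange ((m : Int) + 1) 0 (-1)) (((m : Int) + 1) * q + r)
      = List.replicate (m + 1 - r.toNat) q ++ List.replicate r.toNat (q + 1) := by
  induction m with
  | zero =>
    intro q r h0 h1
    have hr : r = 0 := by omega
    subst hr
    rw [PySem.List.pyRange_neg_one_cons (by omega), PySem.List.pyRange_neg_one_eq_nil (by omega)]
    simp [pvG]
  | succ m ih =>
    intro q r h0 h1
    rw [PySem.List.pyRange_neg_one_cons (by push_cast; omega)]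
    have hv : PySem.Int.floordiv (((m : Int) + 1 + 1) * q + r) ((m : Int) + 1 + 1) = q := by
      exact pv_floordiv_block ((m : Int) + 1 + 1) q r h0 (by push_cast at h1; omega)
    simp only [pvG]
    push_cast
    rw [hv]
    rw [show ((m : Int) + 1 + 1 - 1) = (m : Int) + 1 by ring]
    by_cases hc : r ≤ (m : Int)
    · rw [show ((m : Int) + 1 + 1) * q + r - q = ((m : Int) + 1) * q + r by ring,
          ih q r h0 hc,
          show m + 1 + 1 - r.toNat = (m + 1 - r.toNat) + 1 from by omega,
          List.replicate_succ, List.cons_append]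
    · have hr : r = (m : Int) + 1 := by omega
      subst hr
      rw [show ((m : Int) + 1 + 1) * q + ((m : Int) + 1) - q = ((m : Int) + 1) * (q + 1) + 0 by ring,
          ih (q + 1) 0 (by omega) (by omega),
          show (((m : Int) + 1)).toNat = m + 1 from by omega,
          show m + 1 + 1 - (m + 1) = 1 from by omega]
      simp [List.replicate_succ]

-- modifying the first cell past a (q+1)-prefix of a replicate-q block
theorem pv_modify_at_boundary (k m : Nat) (q : Int) :
    (List.replicate k (q+1) ++ List.replicate (m+1) q).modify k (· + 1)
      = List.replicate (k+1) (q+1) ++ List.replicate m q := by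
  induction k with
  | zero => simp [List.replicate_succ]
  | succ k ih =>
    rw [List.replicate_succ, List.cons_append, List.modify_succ_cons, ih]
    simp [List.replicate_succ]

-- A's second loop: incrementing indices 0..k-1 of [q]*N gives [q+1]*k ++ [q]*(N-k)
theorem pv_incr_loop (k N : Nat) (q : Int) (h : k ≤ N) :
    (PySem.List.pyRange 0 (k:Int)).foldl (fun acc i => acc.modify i.toNat (· + 1)) (List.replicate N q)
      = List.replicate k (q+1) ++ List.replicate (N - k) q := by
  induction k with
  | zero => simp [PySem.List.pyRange]
  | succ k ih =>
    rw [show ((k+1 : Nat) : Int) = (k:Int) + 1 by push_cast; ring,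
        PySem.List.pyRange_one_succ_right (by positivity), List.foldl_append, ih (by omega)]
    simp only [List.foldl_cons, List.foldl_nil, Int.toNat_natCast]
    rw [show N - k = (N - (k+1)) + 1 by omega, pv_modify_at_boundary]

theorem pv_pyRange_nonpos (e : Int) (h : e ≤ 0) : PySem.List.pyRange 0 e = [] := by
  simp [PySem.List.pyRange]; omega

theorem pv_pairwise_le_qs (a b : Nat) (q : Int) :
    (List.replicate a q ++ List.replicate b (q+1)).Pairwise (fun x y => x ≤ y) := by
  rw [List.pairwise_append]
  refine ⟨List.pairwise_replicate.mpr (by omega), List.pairwise_replicate.mpr (by omega), ?_⟩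
  intro x hx y hy
  rw [List.eq_of_mem_replicate hx, List.eq_of_mem_replicate hy]; omega

-- ===== VERDICT (by name: the statement is the Claim_ definition above) =====
theorem solution_spec : Claim_equal_solution := by
  intro n s _ hpre
  unfold Pre_solution at hpre
  unfold Spec_solution solution solution_alt
  by_cases hg : n > s
  · simp [hg]
  · have hn : n ≠ 0 := by
      intro h0; exact hpre ⟨h0, by omega⟩
    simp only [if_neg hg]
    rcases lt_or_gt_of_ne hn with hneg | hpos
    · -- n < 0: every loop is empty on both sides
      have hrb := PySem.Int.mod_neg_bounds s hneg
      rw [pv_pyRange_nonpos n (by omega)]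
      rw [pv_pyRange_nonpos _ hrb.2]
      rw [PySem.List.pyRange_neg_one_eq_nil (by omega)]
      simp [PySem.List.sorted]
    · -- n > 0
      have h0r : 0 ≤ PySem.Int.mod s n := PySem.Int.mod_nonneg s hpos
      have hrn : PySem.Int.mod s n < n := PySem.Int.mod_lt s hpos
      obtain ⟨k, hk⟩ : ∃ k : Nat, PySem.Int.mod s n = (k : Int) := ⟨(PySem.Int.mod s n).toNat, by omega⟩
      obtain ⟨m, hm⟩ : ∃ m : Nat, n = ((m : Int) + 1) := ⟨(n - 1).toNat, by omega⟩
      subst hm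
      set q := PySem.Int.floordiv s ((m : Int) + 1) with hq
      have hs : s = ((m : Int) + 1) * q + (k : Int) := by
        have h5 := PySem.Int.floordiv_mul_add_mod s ((m : Int) + 1)
        rw [← hq, hk] at h5; linarith
      have hkm : k ≤ m := by omega
      -- B side: the greedy fold is pvG, and pvG computes the ascending closed form
      rw [pv_foldl_eq_G, List.nil_append, hk]
      rw [show s = ((m : Int) + 1) * q + (k : Int) from hs]
      rw [pv_G_closed m q (k : Int) (by omega) (by omega)]
      -- A side: fill loop, increment loop, then sort of the permuted closed form
      rw [PySem.List.foldl_append_singleton_eq_map (fun _ => q), List.nil_append,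
          List.map_const']
      rw [show ((m : Int) + 1) = ((m + 1 : Nat) : Int) by push_cast; ring,
          PySem.List.pyRange_zero_natCast, List.length_map, List.length_range,
          pv_incr_loop k (m + 1) q (by omega)]
      rw [show ((k : Int)).toNat = k from by omega]
      exact PySem.List.sorted_id_eq_of_perm_of_pairwise _ _
        List.perm_append_comm (pv_pairwise_le_qs (m + 1 - k) k q)
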